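-- pv_equiv track=rewrite | github.com/sjtuwangjy/scripts | format_result_json.py | block_by_duration
-- ===== SOURCE A (Python) =====
-- INTERVAL = 50  # 时间合并分块的间隔，0表示不进行合并分块，单位秒
--
-- def format_confidence(*args):
--     zxd = sum(args)/len(args)
--     return int(zxd*100) if zxd < 1 else int(round(zxd))
--
-- def block_by_duration(name_summery):
--     '''
--     分块
--     '''
--     name_section = []
--     name_combin = []
--     i = 0
--     p = 0
--     l = len(name_summery)
--     while i < l - 1:
--         if name_summery[i + 1][2] - name_summery[i][3] > INTERVAL:
--             name_section.append(list(name_summery[p:i + 1]))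
--             p = i + 1
--         i += 1
--     name_section.append(list(name_summery[p:]))
--
--     for bl in name_section:
--         name_block = [bl[0][0], bl[0][1], bl[0][2], bl[-1][3], len(bl), format_confidence(*[i[-1] for i in bl])]
--         name_combin.append(name_block)
--
--     return name_combin
-- ===== SOURCE B (Python) =====
-- INTERVAL = 50  # same module constant as A
--
--
-- def block_by_duration(name_summery):
--     """Single linear pass: emit a summary row each time the time gap exceeds
--     INTERVAL, carrying only (first entry, last entry, confidence sum, count)."""
--     first = name_summery[0]
--     last = first
--     total = first[4]
--     count = 1
--     result = []
--     for cur in name_summery[1:]: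
--         if cur[2] - last[3] > INTERVAL:
--             zxd = total / count
--             result.append([first[0], first[1], first[2], last[3], count,
--                            int(zxd * 100) if zxd < 1 else int(round(zxd))])
--             first, last, total, count = cur, cur, cur[4], 1
--         else:
--             last, total, count = cur, total + cur[4], count + 1
--     zxd = total / count
--     result.append([first[0], first[1], first[2], last[3], count,
--                    int(zxd * 100) if zxd < 1 else int(round(zxd))])
--     return result
-- ===== Notes on version B (the rewrite author's own statement) =====
-- stated objective: simpler
-- what changed: Replaces A's two-phase pipeline (index/while loop cutting the list into slice copies, then a second loop summarizing each slice) with one linear pass that keeps only the current block's first entry, last entry, running confidence sum and count, emitting a summary row at each gap.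
import Mathlib
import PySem

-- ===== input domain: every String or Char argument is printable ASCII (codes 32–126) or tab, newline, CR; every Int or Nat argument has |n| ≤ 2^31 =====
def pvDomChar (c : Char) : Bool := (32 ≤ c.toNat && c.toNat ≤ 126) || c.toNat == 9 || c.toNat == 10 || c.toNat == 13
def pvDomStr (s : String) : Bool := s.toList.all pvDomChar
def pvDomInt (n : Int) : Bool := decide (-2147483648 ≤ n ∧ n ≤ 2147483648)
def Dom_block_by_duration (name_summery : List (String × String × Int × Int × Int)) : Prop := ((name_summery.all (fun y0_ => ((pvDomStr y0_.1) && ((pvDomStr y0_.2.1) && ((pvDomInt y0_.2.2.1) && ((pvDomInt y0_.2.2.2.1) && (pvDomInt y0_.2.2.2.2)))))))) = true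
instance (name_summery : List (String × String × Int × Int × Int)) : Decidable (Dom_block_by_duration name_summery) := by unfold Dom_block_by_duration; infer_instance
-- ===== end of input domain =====

-- B is a single linear pass (explicit recursion carrying first/last/sum/count, emitting a row at
-- each gap) instead of A's two phases (cut the list into slice copies, then summarize each slice);
-- same return value. Python's float expression `sum/len`, `*100`, `int()`, `round()` is simulated
-- EXACTLY (IEEE-754 binary64, round-to-nearest ties-even; overflow/subnormals not modeled — they
-- need values beyond any representable input of this task); each port carries its own simulator,
-- written differently, and the proof shows the two simulators agree.

abbrev PvE := String × String × Int × Int × Int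
abbrev PvR := String × String × Int × Int × Int × Int

def pvEntry0 : PvE := ("", "", 0, 0, 0)

-- ===== PORT A =====
-- A-side float simulator: normalize to a signed (M, e) pair, 2^52 ≤ |M| < 2^53

def pvBitLen (a : Nat) : Nat := PySem.Int.bitLength (a : Int)

-- round-to-nearest-even a/den to 53 significant bits: (M, e) with value M*2^e (a, den > 0)
def pvRN53 (a den : Nat) : Nat × Int :=
  let e : Int := (pvBitLen a : Int) - (pvBitLen den : Int) - 53
  let nd : Nat × Nat := if 0 ≤ e then (a, den <<< e.toNat) else (a <<< (-e).toNat, den)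
  let q := nd.1 / nd.2
  let r := nd.1 % nd.2
  if q < 2 ^ 53 then
    let M := q + (if 2 * r > nd.2 ∨ (2 * r = nd.2 ∧ q % 2 = 1) then 1 else 0)
    if M = 2 ^ 53 then (2 ^ 52, e + 1) else (M, e)
  else
    let q2 := q / 2
    let M := q2 + (if q % 2 = 1 ∧ (r > 0 ∨ q2 % 2 = 1) then 1 else 0)
    if M = 2 ^ 53 then (2 ^ 52, e + 2) else (M, e + 1)

-- fl(s/n) as signed (M, e); zero is (0, 0)
def pvFDiv (s n : Int) : Int × Int :=
  if s = 0 then (0, 0)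
  else if 0 < s then
    let me := pvRN53 s.toNat n.toNat
    ((me.1 : Int), me.2)
  else
    let me := pvRN53 (-s).toNat n.toNat
    (-(me.1 : Int), me.2)

-- fl(x*100) for x = M*2^e
def pvFMul100 (M : Int) (e : Int) : Int × Int :=
  if M = 0 then (0, 0)
  else if 0 < M then
    let me := pvRN53 (M.toNat * 100) 1
    ((me.1 : Int), me.2 + e)
  else
    let me := pvRN53 ((-M).toNat * 100) 1
    (-(me.1 : Int), me.2 + e)

-- M*2^e < 1 ?
def pvLtOne (M : Int) (e : Int) : Bool :=
  if M ≤ 0 then true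
  else if 0 ≤ e then false
  else decide (M < ((1 : Int) <<< (-e).toNat))

-- int(M*2^e): truncate toward zero
def pvFTrunc (M : Int) (e : Int) : Int :=
  if 0 ≤ e then M <<< e.toNat
  else if 0 ≤ M then M >>> (-e).toNat
  else -((-M) >>> (-e).toNat)

-- round(M*2^e): nearest integer, ties to even
def pvFRound (M : Int) (e : Int) : Int :=
  if 0 ≤ e then M <<< e.toNat
  else
    let a := M.natAbs
    let f : Nat := 1 <<< (-e).toNat
    let q := a / f + (if 2 * (a % f) > f ∨ (2 * (a % f) = f ∧ (a / f) % 2 = 1) then 1 else 0)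
    if M < 0 then -(q : Int) else (q : Int)

-- `zxd = total/count; int(zxd*100) if zxd < 1 else int(round(zxd))`
def pvFloatConf (total count : Int) : Int :=
  let me := pvFDiv total count
  if pvLtOne me.1 me.2 then
    let me2 := pvFMul100 me.1 me.2
    pvFTrunc me2.1 me2.2
  else pvFRound me.1 me.2

def format_confidence (args : List Int) : Int := pvFloatConf args.sum (args.length : Int)

def block_by_duration (name_summery : List (String × String × Int × Int × Int)) : List (String × String × Int × Int × Int × Int) :=
  let l := name_summery.length
  -- while i < l - 1: cut before i+1 when the gap exceeds INTERVAL = 50; state (name_section, p)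
  let sp := (List.range (l - 1)).foldl
    (fun (st : List (List (String × String × Int × Int × Int)) × Nat) i =>
      if (PySem.List.pyGetD name_summery (Int.ofNat i + 1) pvEntry0).2.2.1
           - (PySem.List.pyGetD name_summery (Int.ofNat i) pvEntry0).2.2.2.1 > 50 then
        (st.1 ++ [PySem.List.slice name_summery (some (Int.ofNat st.2)) (some (Int.ofNat i + 1))], i + 1)
      else st) ([], 0)
  let name_section := sp.1 ++ [PySem.List.slice name_summery (some (Int.ofNat sp.2)) none]
  name_section.foldl
    (fun acc bl =>
      let b0 := PySem.List.pyGetD bl 0 pvEntry0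
      let bm1 := PySem.List.pyGetD bl (-1) pvEntry0
      acc ++ [(b0.1, b0.2.1, b0.2.2.1, bm1.2.2.2.1, (bl.length : Int),
               format_confidence (bl.map (fun i => i.2.2.2.2)))]) []

-- ===== PORT B =====
-- B-side float simulator, written independently: branch-free power-of-two scaling, one generic
-- round-to-nearest-even division helper, and the sign applied once at the end.

-- nearest integer to a/d, ties to even (d > 0)
def qfRNE (a d : Nat) : Nat :=
  a / d + (if d < 2 * (a % d) + a / d % 2 then 1 else 0)

-- round a/d to 53 significant bits as a (mantissa, exponent) pair of magnitude (a, d > 0)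
def qf53 (a d : Nat) : Nat × Int :=
  let e : Int := (PySem.Int.bitLength (a : Int) : Int) - (PySem.Int.bitLength (d : Int) : Int) - 53
  let x := a * 2 ^ (-e).toNat
  let y := d * 2 ^ e.toNat
  if x < 2 ^ 53 * y then
    let m := qfRNE x y
    if m = 2 ^ 53 then (2 ^ 52, e + 1) else (m, e)
  else
    let m := qfRNE x (2 * y)
    if m = 2 ^ 53 then (2 ^ 52, e + 2) else (m, e + 1)

-- `zxd = tot/cnt; int(zxd*100) if zxd < 1 else int(round(zxd))`, cnt > 0
def qfConf (tot cnt : Int) : Int :=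
  if tot = 0 then 0 else
  let me := qf53 tot.natAbs cnt.toNat
  if tot < 0 ∨ (me.2 < 0 ∧ me.1 < 2 ^ (-me.2).toNat) then
    let me2 := qf53 (me.1 * 100) 1
    let t := me2.2 + me.2
    let mag : Int := if 0 ≤ t then (me2.1 : Int) * 2 ^ t.toNat else ((me2.1 / 2 ^ (-t).toNat : Nat) : Int)
    if tot < 0 then -mag else mag
  else
    if 0 ≤ me.2 then (me.1 : Int) * 2 ^ me.2.toNat else ((qfRNE me.1 (2 ^ (-me.2).toNat) : Nat) : Int)

-- the for-loop of Source B as structural recursion over the remaining entries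
def altLoop (xs : List PvE) (out : List PvR) (first last : PvE) (tot cnt : Int) : List PvR :=
  match xs with
  | [] => out ++ [(first.1, first.2.1, first.2.2.1, last.2.2.2.1, cnt, qfConf tot cnt)]
  | c :: cs =>
    if c.2.2.1 - last.2.2.2.1 > 50 then
      altLoop cs (out ++ [(first.1, first.2.1, first.2.2.1, last.2.2.2.1, cnt, qfConf tot cnt)])
        c c c.2.2.2.2 1
    else
      altLoop cs out first c (tot + c.2.2.2.2) (cnt + 1)

def block_by_duration_alt (name_summery : List (String × String × Int × Int × Int)) : List (String × String × Int × Int × Int × Int) :=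
  match name_summery with
  | [] => []   -- Python B raises IndexError at name_summery[0]; excluded by Pre_
  | first :: rest => altLoop rest [] first first first.2.2.2.2 1

-- ===== PRECONDITION & SPEC =====
-- Pre_ excludes only the empty list, on which A (bl[0]) raises IndexError.
def Pre_block_by_duration (name_summery : List (String × String × Int × Int × Int)) : Prop := name_summery ≠ []
instance (name_summery : List (String × String × Int × Int × Int)) : Decidable (Pre_block_by_duration name_summery) := by unfold Pre_block_by_duration; infer_instance
def pvWitness_block_by_duration : (List (String × String × Int × Int × Int)) := [("a", "b", 1, 2, 3)]
def Spec_block_by_duration (name_summery : List (String × String × Int × Int × Int)) (out : List (String × String × Int × Int × Int × Int)) : Prop := out = block_by_duration_alt name_summery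
instance (name_summery : List (String × String × Int × Int × Int)) (out : List (String × String × Int × Int × Int × Int)) : Decidable (Spec_block_by_duration name_summery out) := by unfold Spec_block_by_duration; infer_instance

-- ===== CLAIM (what is proved, stated in full; the proofs are below) =====
def Claim_equal_block_by_duration : Prop := ∀ (name_summery : List (String × String × Int × Int × Int)), Dom_block_by_duration name_summery → Pre_block_by_duration name_summery → Spec_block_by_duration name_summery (block_by_duration name_summery)

-- ===== LEMMAS AND PROOFS =====

-- ---- the two float simulators agree ----

theorem qfRNE_expand (a d : Nat) (hd : 0 < d) :
    qfRNE a d = a / d + (if 2 * (a % d) > d ∨ (2 * (a % d) = d ∧ a / d % 2 = 1) then 1 else 0) := by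
  have hr : a % d < d := Nat.mod_lt a hd
  unfold qfRNE
  obtain ⟨q, hq⟩ : ∃ q, a / d = q := ⟨_, rfl⟩
  obtain ⟨r, hrr⟩ : ∃ r, a % d = r := ⟨_, rfl⟩
  rw [hrr] at hr
  rw [hq, hrr]
  split_ifs <;> omega

theorem qfRNE_double (a d : Nat) (hd : 0 < d) :
    qfRNE a (2 * d) = a / d / 2 + (if a / d % 2 = 1 ∧ (a % d > 0 ∨ a / d / 2 % 2 = 1) then 1 else 0) := by
  have hr : a % d < d := Nat.mod_lt a hd
  have hQ : a / (2 * d) = a / d / 2 := by rw [Nat.mul_comm, ← Nat.div_div_eq_div_mul]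
  have hR : a % (2 * d) = a % d + d * (a / d % 2) := by rw [Nat.mul_comm]; exact Nat.mod_mul
  unfold qfRNE
  rcases Nat.mod_two_eq_zero_or_one (a / d) with h | h
  · rw [h, Nat.mul_zero, Nat.add_zero] at hR
    rw [hQ, hR]
    generalize hq : a / d = q at h ⊢
    generalize hrr : a % d = r at hr ⊢
    split_ifs <;> omega
  · rw [h, Nat.mul_one] at hR
    rw [hQ, hR]
    generalize hq : a / d = q at h ⊢
    generalize hrr : a % d = r at hr ⊢
    split_ifs <;> omega

theorem qf53_eq (a d : Nat) (_ha : 0 < a) (hd : 0 < d) : qf53 a d = pvRN53 a d := by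
  unfold qf53 pvRN53 pvBitLen
  by_cases he : (0:Int) ≤ (PySem.Int.bitLength (a : Int) : Int) - (PySem.Int.bitLength (d : Int) : Int) - 53
  · have h0 : (-((PySem.Int.bitLength (a : Int) : Int) - (PySem.Int.bitLength (d : Int) : Int) - 53)).toNat = 0 := by omega
    simp only [if_pos he, h0, pow_zero, Nat.mul_one, Nat.shiftLeft_eq]
    have hy : 0 < d * 2 ^ ((PySem.Int.bitLength (a : Int) : Int) - (PySem.Int.bitLength (d : Int) : Int) - 53).toNat :=
      Nat.mul_pos hd (Nat.two_pow_pos _)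
    rw [qfRNE_expand _ _ hy, qfRNE_double _ _ hy]
    simp only [Nat.div_lt_iff_lt_mul hy]
  · have h0 : ((PySem.Int.bitLength (a : Int) : Int) - (PySem.Int.bitLength (d : Int) : Int) - 53).toNat = 0 := by omega
    simp only [if_neg he, h0, pow_zero, Nat.mul_one, Nat.shiftLeft_eq]
    rw [qfRNE_expand _ _ hd, qfRNE_double _ _ hd]
    simp only [Nat.div_lt_iff_lt_mul hd]

theorem qf53_pos (a d : Nat) (ha : 0 < a) (hd : 0 < d) : 0 < (qf53 a d).1 := by
  simp only [qf53]
  set A := PySem.Int.bitLength (a : Int) with hA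
  set D := PySem.Int.bitLength (d : Int) with hD
  set E : Int := (A : Int) - (D : Int) - 53 with hE
  have ha2 : 2 ^ (A - 1) ≤ a := by
    have := PySem.Int.two_pow_bitLength_le (a : Int) (by exact_mod_cast ha.ne')
    simpa [hA] using this
  have ha3 : a < 2 ^ A := by have := PySem.Int.lt_two_pow_bitLength (a : Int); simpa [hA] using this
  have hd3 : d < 2 ^ D := by have := PySem.Int.lt_two_pow_bitLength (d : Int); simpa [hD] using this
  have hA1 : 1 ≤ A := by
    by_contra h
    have h0 : A = 0 := by omega
    rw [h0, pow_zero] at ha3; omega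
  have hxy : d * 2 ^ E.toNat ≤ a * 2 ^ (-E).toNat := by
    by_cases he : 0 ≤ E
    · have h1 : (-E).toNat = 0 := by omega
      have h2 : D + E.toNat + 53 = A := by omega
      rw [h1, pow_zero, Nat.mul_one]
      calc d * 2 ^ E.toNat ≤ 2 ^ D * 2 ^ E.toNat := mul_le_mul_right' hd3.le _
        _ = 2 ^ (D + E.toNat) := by rw [pow_add]
        _ ≤ 2 ^ (A - 1) := Nat.pow_le_pow_right (by norm_num) (by omega)
        _ ≤ a := ha2
    · have h1 : E.toNat = 0 := by omega
      have h2 : (A - 1) + (-E).toNat = D + 52 := by omega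
      rw [h1, pow_zero, Nat.mul_one]
      calc d ≤ 2 ^ D := hd3.le
        _ ≤ 2 ^ (D + 52) := Nat.pow_le_pow_right (by norm_num) (by omega)
        _ = 2 ^ ((A - 1) + (-E).toNat) := by rw [h2]
        _ = 2 ^ (A - 1) * 2 ^ (-E).toNat := by rw [pow_add]
        _ ≤ a * 2 ^ (-E).toNat := mul_le_mul_right' ha2 _
  have hy : 0 < d * 2 ^ E.toNat := Nat.mul_pos hd (Nat.two_pow_pos _)
  have hq1 : 1 ≤ a * 2 ^ (-E).toNat / (d * 2 ^ E.toNat) := (Nat.one_le_div_iff hy).mpr hxy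
  split_ifs with hbig h53 h53
  · exact Nat.two_pow_pos 52
  · show 0 < qfRNE (a * 2 ^ (-E).toNat) (d * 2 ^ E.toNat)
    unfold qfRNE
    exact Nat.lt_of_lt_of_le hq1 (Nat.le_add_right _ _)
  · exact Nat.two_pow_pos 52
  · show 0 < qfRNE (a * 2 ^ (-E).toNat) (2 * (d * 2 ^ E.toNat))
    have h2y : 0 < 2 * (d * 2 ^ E.toNat) := by omega
    have hge : 2 * (d * 2 ^ E.toNat) ≤ a * 2 ^ (-E).toNat := by
      have h1 : 2 * (d * 2 ^ E.toNat) ≤ 2 ^ 53 * (d * 2 ^ E.toNat) := mul_le_mul_right' (by norm_num) _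
      omega
    have hq2 : 1 ≤ a * 2 ^ (-E).toNat / (2 * (d * 2 ^ E.toNat)) := (Nat.one_le_div_iff h2y).mpr hge
    unfold qfRNE
    exact Nat.lt_of_lt_of_le hq2 (Nat.le_add_right _ _)

theorem cast_shr (x k : Nat) : ((x : Int)) >>> k = ((x / 2 ^ k : Nat) : Int) := by
  rw [show ((x : Int)) >>> k = ((x >>> k : Nat) : Int) from by exact_mod_cast rfl,
      Nat.shiftRight_eq_div_pow]

theorem pvLtOne_cast (m : Nat) (e : Int) (hm : 0 < m) :
    pvLtOne (m : Int) e = decide (e < 0 ∧ m < 2 ^ (-e).toNat) := by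
  unfold pvLtOne
  split_ifs with h1 h2
  · exfalso; omega
  · have h3 : ¬(e < 0 ∧ m < 2 ^ (-e).toNat) := by omega
    simp [h3]
  · have he : e < 0 := by omega
    have h4 : ((1 : Int) <<< (-e).toNat) = ((2 : Int)) ^ (-e).toNat := by
      rw [Int.shiftLeft_eq, one_mul]
    rw [h4, decide_eq_decide]
    constructor
    · intro h; exact ⟨he, by exact_mod_cast h⟩
    · intro h; exact_mod_cast h.2

theorem qfConf_eq (s n : Int) (hn : 0 < n) : qfConf s n = pvFloatConf s n := by
  rcases lt_trichotomy s 0 with hs | hs | hs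
  · -- s < 0
    have hs0 : s ≠ 0 := by omega
    have hnat : 0 < s.natAbs := by omega
    have hdn : 0 < n.toNat := by omega
    have hton : (-s).toNat = s.natAbs := by omega
    rcases hq : qf53 s.natAbs n.toNat with ⟨m, e⟩
    have hA : pvRN53 s.natAbs n.toNat = (m, e) := by rw [← qf53_eq _ _ hnat hdn, hq]
    have hmpos : 0 < m := by
      have := qf53_pos s.natAbs n.toNat hnat hdn; rw [hq] at this; exact this
    rcases hq2 : qf53 (m * 100) 1 with ⟨m2, e2⟩
    have hB : pvRN53 (m * 100) 1 = (m2, e2) := by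
      rw [← qf53_eq _ _ (by omega) one_pos, hq2]
    have hm2pos : 0 < m2 := by
      have := qf53_pos (m * 100) 1 (by omega) one_pos; rw [hq2] at this; exact this
    unfold qfConf pvFloatConf pvFDiv
    rw [if_neg hs0, if_neg hs0, if_neg (by omega : ¬(0 : Int) < s), hton, hA, hq]
    dsimp only
    rw [if_pos (Or.inl hs : s < 0 ∨ (e < 0 ∧ m < 2 ^ (-e).toNat))]
    have hlt : pvLtOne (-(m : Int)) e = true := by
      unfold pvLtOne; rw [if_pos (by omega : -(m : Int) ≤ 0)]
    rw [if_pos hlt]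
    unfold pvFMul100
    rw [if_neg (by omega : ¬(-(m : Int)) = 0), if_neg (by omega : ¬(0 : Int) < -(m : Int)),
        neg_neg, Int.toNat_natCast, hB, hq2]
    dsimp only
    unfold pvFTrunc
    rw [if_pos hs]
    by_cases ht : 0 ≤ e2 + e
    · rw [if_pos ht, if_pos ht, Int.shiftLeft_eq]
      ring
    · rw [if_neg ht, if_neg ht, if_neg (by omega : ¬(0 : Int) ≤ -(m2 : Int)),
          neg_neg, cast_shr]
  · -- s = 0
    subst hs
    simp [qfConf, pvFloatConf, pvFDiv, pvLtOne, pvFMul100, pvFTrunc, Int.shiftLeft_eq]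
  · -- s > 0
    have hs0 : s ≠ 0 := by omega
    have hnat : 0 < s.natAbs := by omega
    have hdn : 0 < n.toNat := by omega
    have htos : s.toNat = s.natAbs := by omega
    rcases hq : qf53 s.natAbs n.toNat with ⟨m, e⟩
    have hA : pvRN53 s.natAbs n.toNat = (m, e) := by rw [← qf53_eq _ _ hnat hdn, hq]
    have hmpos : 0 < m := by
      have := qf53_pos s.natAbs n.toNat hnat hdn; rw [hq] at this; exact this
    unfold qfConf pvFloatConf pvFDiv
    rw [if_neg hs0, if_neg hs0, if_pos hs, htos, hA, hq]
    dsimp only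
    by_cases hc : e < 0 ∧ m < 2 ^ (-e).toNat
    · rcases hq2 : qf53 (m * 100) 1 with ⟨m2, e2⟩
      have hB : pvRN53 (m * 100) 1 = (m2, e2) := by
        rw [← qf53_eq _ _ (by omega) one_pos, hq2]
      have hm2pos : 0 < m2 := by
        have := qf53_pos (m * 100) 1 (by omega) one_pos; rw [hq2] at this; exact this
      rw [if_pos (Or.inr hc : s < 0 ∨ (e < 0 ∧ m < 2 ^ (-e).toNat))]
      have hpl : pvLtOne (m : Int) e = true := by
        rw [pvLtOne_cast m e hmpos]; simpa using hc
      rw [if_pos hpl]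
      unfold pvFMul100
      rw [if_neg (by omega : ¬((m : Int)) = 0), if_pos (by omega : (0 : Int) < (m : Int)),
          Int.toNat_natCast, hB]
      dsimp only
      unfold pvFTrunc
      rw [if_neg (by omega : ¬ s < 0)]
      by_cases ht : 0 ≤ e2 + e
      · rw [if_pos ht, if_pos ht, Int.shiftLeft_eq]
      · rw [if_neg ht, if_neg ht, if_pos (by positivity : (0 : Int) ≤ (m2 : Int)), cast_shr]
    · have hnc : ¬(s < 0 ∨ (e < 0 ∧ m < 2 ^ (-e).toNat)) := by
        rintro (h | h)
        · omega
        · exact hc h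
      rw [if_neg hnc]
      have hpl : pvLtOne (m : Int) e = false := by
        rw [pvLtOne_cast m e hmpos]; exact decide_eq_false hc
      rw [if_neg (show ¬ pvLtOne (m : Int) e = true by simp [hpl])]
      unfold pvFRound
      by_cases hep : 0 ≤ e
      · rw [if_pos hep, if_pos hep, Int.shiftLeft_eq]
      · rw [if_neg hep, if_neg hep]
        simp only [Int.natAbs_natCast, Nat.one_shiftLeft]
        rw [if_neg (show ¬((m : Int)) < 0 by omega),
            qfRNE_expand m (2 ^ (-e).toNat) (Nat.two_pow_pos _)]

-- ---- segmentation machinery (shared reference model) ----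

-- reference segmentation: current (nonempty) block s, remaining entries
def pvSegs (s : List PvE) : List PvE → List (List PvE)
  | [] => [s]
  | b :: ys =>
    if b.2.2.1 - (s.getLastD pvEntry0).2.2.2.1 > 50 then s :: pvSegs [b] ys
    else pvSegs (s ++ [b]) ys

-- A's per-block summary
def pvSumm (bl : List PvE) : PvR :=
  let b0 := PySem.List.pyGetD bl 0 pvEntry0
  let bm1 := PySem.List.pyGetD bl (-1) pvEntry0
  (b0.1, b0.2.1, b0.2.2.1, bm1.2.2.2.1, (bl.length : Int),
   format_confidence (bl.map (fun i => i.2.2.2.2)))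

-- named copy of A's segmentation loop body (definitionally the port's lambda)
def pvAStep (ns : List PvE) (st : List (List PvE) × Nat) (i : Nat) : List (List PvE) × Nat :=
  if (PySem.List.pyGetD ns (Int.ofNat i + 1) pvEntry0).2.2.1
       - (PySem.List.pyGetD ns (Int.ofNat i) pvEntry0).2.2.2.1 > 50 then
    (st.1 ++ [PySem.List.slice ns (some (Int.ofNat st.2)) (some (Int.ofNat i + 1))], i + 1)
  else st

def pvSections (ns : List PvE) : List (List PvE) :=
  let sp := (List.range (ns.length - 1)).foldl (pvAStep ns) ([], 0)
  sp.1 ++ [PySem.List.slice ns (some (Int.ofNat sp.2)) none]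

theorem pvA_unfold (ns : List PvE) : block_by_duration ns = (pvSections ns).map pvSumm := by
  show (pvSections ns).foldl (fun acc bl => acc ++ [pvSumm bl]) [] = (pvSections ns).map pvSumm
  rw [PySem.List.foldl_append_singleton_eq_map pvSumm, List.nil_append]

-- the block-summary components held in B's loop state equal pvSumm of the block
theorem pvSumm_state (s : List PvE) (h : s ≠ []) :
    ((s.getD 0 pvEntry0).1, (s.getD 0 pvEntry0).2.1, (s.getD 0 pvEntry0).2.2.1,
     (s.getLastD pvEntry0).2.2.2.1, ((s.length : Nat) : Int),
     pvFloatConf (s.map (fun e => e.2.2.2.2)).sum ((s.length : Nat) : Int)) = pvSumm s := by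
  unfold pvSumm format_confidence
  rw [PySem.List.pyGetD_zero, PySem.List.pyGetD_neg_one s pvEntry0 h,
      List.getLastD_eq_getLast?, List.getLast?_eq_some_getLast h, Option.getD_some,
      List.length_map]

theorem pvLastTake (ns : List PvE) (p j : Nat) (hpj : p ≤ j) (hj : j < ns.length) :
    ((ns.drop p).take (j + 1 - p)).getLastD pvEntry0 = ns[j] := by
  have hlen : ((ns.drop p).take (j + 1 - p)).length = j + 1 - p := by
    simp [List.length_take, List.length_drop]; omega
  have hne : (ns.drop p).take (j + 1 - p) ≠ [] := by
    intro hnil; rw [hnil] at hlen; simp at hlen; omega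
  rw [List.getLastD_eq_getLast?, List.getLast?_eq_some_getLast hne, Option.getD_some,
      List.getLast_eq_getElem hne]
  simp only [List.getElem_take, List.getElem_drop]
  congr 1
  rw [hlen]
  omega

theorem pvTakeSucc (ns : List PvE) (p j : Nat) (hpj : p ≤ j + 1) (hj : j + 1 < ns.length) :
    (ns.drop p).take (j + 1 - p) ++ [ns[j + 1]] = (ns.drop p).take (j + 2 - p) := by
  have h2 : j + 2 - p = (j + 1 - p) + 1 := by omega
  have hlt : j + 1 - p < (ns.drop p).length := by simp [List.length_drop]; omega
  rw [h2, List.take_add_one]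
  congr 1
  rw [List.getElem?_eq_getElem hlt]
  simp only [List.getElem_drop, Option.toList_some]
  congr 2
  omega

theorem pvA_loop (ns : List PvE) : ∀ (k j p : Nat) (sec : List (List PvE)), p ≤ j → j + 1 + k = ns.length →
    (let st := (List.range' j k).foldl (pvAStep ns) (sec, p)
     st.1 ++ [PySem.List.slice ns (some (Int.ofNat st.2)) none])
    = sec ++ pvSegs ((ns.drop p).take (j + 1 - p)) (ns.drop (j + 1)) := by
  intro k
  induction k with
  | zero =>
    intro j p sec hpj hlen
    simp only [List.range', List.foldl_nil]
    have hd : ns.drop (j + 1) = [] := List.drop_eq_nil_of_le (by omega)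
    rw [hd]
    unfold pvSegs
    have ht : (ns.drop p).take (j + 1 - p) = ns.drop p := by
      apply List.take_of_length_le
      simp [List.length_drop]; omega
    have hs : PySem.List.slice ns (some (Int.ofNat p)) none = ns.drop p := by
      rw [Int.ofNat_eq_natCast, PySem.List.slice_from_natCast]
    rw [ht, hs]
  | succ k ih =>
    intro j p sec hpj hlen
    have hj1 : j + 1 < ns.length := by omega
    have hj : j < ns.length := by omega
    rw [List.range'_succ, List.foldl_cons]
    have hstep : pvAStep ns (sec, p) j =
        if ns[j + 1].2.2.1 - ns[j].2.2.2.1 > 50 then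
          (sec ++ [(ns.drop p).take (j + 1 - p)], j + 1)
        else (sec, p) := by
      unfold pvAStep
      simp only [Int.ofNat_eq_natCast]
      rw [show ((j : Int) + 1) = ((j + 1 : Nat) : Int) from by push_cast; ring]
      rw [PySem.List.pyGetD_natCast, PySem.List.pyGetD_natCast, PySem.List.slice_natCast,
          List.getD_eq_getElem ns pvEntry0 hj1, List.getD_eq_getElem ns pvEntry0 hj]
    have hdrop : ns.drop (j + 1) = ns[j + 1] :: ns.drop (j + 2) := by
      rw [List.drop_eq_getElem_cons hj1]
    rw [hstep]
    by_cases hc : ns[j + 1].2.2.1 - ns[j].2.2.2.1 > 50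
    · rw [if_pos hc, ih (j + 1) (j + 1) (sec ++ [(ns.drop p).take (j + 1 - p)]) (le_refl _) (by omega)]
      conv_rhs => rw [hdrop, pvSegs]
      rw [pvLastTake ns p j hpj hj, if_pos hc]
      rw [show j + 1 + 1 - (j + 1) = 1 from by omega, show j + 1 + 1 = j + 2 from by omega, hdrop]
      rw [show List.take 1 (ns[j + 1] :: ns.drop (j + 2)) = [ns[j + 1]] from rfl]
      try rw [List.append_assoc, List.singleton_append]
    · rw [if_neg hc, ih (j + 1) p sec (by omega) (by omega)]
      conv_rhs => rw [hdrop, pvSegs]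
      rw [pvLastTake ns p j hpj hj, if_neg hc, pvTakeSucc ns p j (by omega) hj1]

theorem pv_A_sections (ns : List PvE) (h : ns ≠ []) :
    block_by_duration ns = (pvSegs [ns.getD 0 pvEntry0] ns.tail).map pvSumm := by
  obtain ⟨a, xs, rfl⟩ : ∃ a xs, ns = a :: xs := by
    cases ns with
    | nil => exact absurd rfl h
    | cons a xs => exact ⟨a, xs, rfl⟩
  rw [pvA_unfold]
  congr 1
  have hl := pvA_loop (a :: xs) ((a :: xs).length - 1) 0 0 [] (le_refl 0)
    (by simp [List.length_cons]; omega)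
  simp only [List.nil_append] at hl
  unfold pvSections
  rw [List.range_eq_range', hl]
  simp

-- ---- B's recursive pass produces the same per-block summaries ----

theorem altLoop_eq : ∀ (xs : List PvE) (out : List PvR) (s : List PvE), s ≠ [] →
    altLoop xs out (s.getD 0 pvEntry0) (s.getLastD pvEntry0)
      ((s.map (fun e => e.2.2.2.2)).sum) ((s.length : Nat) : Int)
    = out ++ (pvSegs s xs).map pvSumm := by
  intro xs
  induction xs with
  | nil =>
    intro out s h
    unfold altLoop pvSegs
    simp only [List.map_cons, List.map_nil]
    rw [qfConf_eq _ _ (by exact_mod_cast List.length_pos_iff.mpr h), pvSumm_state s h]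
  | cons b ys ih =>
    intro out s h
    unfold altLoop
    conv_rhs => rw [pvSegs]
    by_cases hc : b.2.2.1 - (s.getLastD pvEntry0).2.2.2.1 > 50
    · rw [if_pos hc, if_pos hc]
      rw [qfConf_eq _ _ (by exact_mod_cast List.length_pos_iff.mpr h), pvSumm_state s h]
      have := ih (out ++ [pvSumm s]) [b] (by simp)
      simp only [List.getD_cons_zero, List.getLastD_cons, List.getLastD_nil,
        List.map_cons, List.map_nil, List.sum_cons, List.sum_nil, Int.add_zero,
        List.length_cons, List.length_nil, Nat.zero_add, Nat.cast_one] at this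
      rw [this, List.map_cons, List.append_assoc, List.singleton_append]
    · rw [if_neg hc, if_neg hc]
      have := ih out (s ++ [b]) (by simp)
      rw [List.getD_append s [b] pvEntry0 0 (List.length_pos_iff.mpr h),
          List.getLastD_concat] at this
      simp only [List.map_append, List.sum_append, List.length_append, List.map_cons,
        List.map_nil, List.sum_cons, List.sum_nil, Int.add_zero, List.length_cons,
        List.length_nil, Nat.cast_add, Nat.cast_one, zero_add] at this
      rw [← this]

theorem pv_B_eq (ns : List PvE) (h : ns ≠ []) :
    block_by_duration_alt ns = (pvSegs [ns.getD 0 pvEntry0] ns.tail).map pvSumm := by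
  obtain ⟨a, xs, rfl⟩ : ∃ a xs, ns = a :: xs := by
    cases ns with
    | nil => exact absurd rfl h
    | cons a xs => exact ⟨a, xs, rfl⟩
  have hb : block_by_duration_alt (a :: xs) = altLoop xs [] a a a.2.2.2.2 1 := rfl
  rw [hb]
  have := altLoop_eq xs [] [a] (by simp)
  simp only [List.getD_cons_zero, List.getLastD_cons, List.getLastD_nil, List.map_cons,
    List.map_nil, List.sum_cons, List.sum_nil, Int.add_zero, List.length_cons,
    List.length_nil, Nat.zero_add, Nat.cast_one, List.nil_append] at this
  rw [this]
  rfl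

-- ===== VERDICT (by name: the statement is the Claim_ definition above) =====
theorem block_by_duration_spec : Claim_equal_block_by_duration := by
  intro ns _ hpre
  unfold Spec_block_by_duration
  rw [pv_A_sections ns hpre, pv_B_eq ns hpre]
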